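-- pv_equiv track=rewrite | github.com/jogloran/advent-of-code-2020 | d23.py | get_dest
-- ===== SOURCE A (Python) =====
-- def get_dest(L, cur):
--     max_index = max(L)
--     cur -= 1
--     if cur < 0: cur = max_index
--     while True:
--         if cur in L: return L.index(cur)
--
--         cur -= 1
--         if cur < 0: cur = max_index
-- ===== SOURCE B (Python) =====
-- def get_dest(L, cur):
--     below = [v for v in L if 0 <= v < cur]
--     dest = max(below) if below else max(L)
--     return L.index(dest)
-- ===== Notes on version B (the rewrite author's own statement) =====
-- stated objective: faster
-- what changed: Replaces A's decrement-and-membership-scan while-loop (each step an O(n) 'in L' test, up to cur steps) with a single filtered-maximum: dest = max of the values of L in [0, cur), else max(L) (the wrap case), then one index lookup.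
import Mathlib
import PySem

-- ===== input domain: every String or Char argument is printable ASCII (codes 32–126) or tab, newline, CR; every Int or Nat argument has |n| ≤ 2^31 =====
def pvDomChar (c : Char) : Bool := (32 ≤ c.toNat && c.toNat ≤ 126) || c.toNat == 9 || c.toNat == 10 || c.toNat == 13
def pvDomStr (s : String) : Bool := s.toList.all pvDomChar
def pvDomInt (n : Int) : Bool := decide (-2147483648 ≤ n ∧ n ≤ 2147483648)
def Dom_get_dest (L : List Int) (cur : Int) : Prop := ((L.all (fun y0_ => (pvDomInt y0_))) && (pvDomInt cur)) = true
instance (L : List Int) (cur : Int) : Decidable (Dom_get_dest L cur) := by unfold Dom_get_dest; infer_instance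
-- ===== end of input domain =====

-- B replaces A's downward decrement-and-membership-scan loop by a single filtered-maximum
-- selection (max of the values in L below cur, else max(L)); objective: simpler, one pass.

-- ===== PORT A =====
-- the while-True loop; fuel only makes the recursion total (the caller supplies enough:
-- the loop reaches a member of L after at most c.toNat+1 decrements plus one wrap to max)
def get_dest_loop (L : List Int) (m : Int) : Nat → Int → Int
  | 0, _ => 0
  | fuel+1, c =>
    match PySem.List.index? L c with
    | some i => (i : Int)
    | none =>
      let c' := c - 1
      get_dest_loop L m fuel (if c' < 0 then m else c')

def get_dest (L : List Int) (cur : Int) : Int :=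
  -- Python's max(L) raises ValueError on []; that input is excluded by Pre_get_dest
  let m := (PySem.List.max? L (fun x => x)).getD 0
  let c := cur - 1
  let c := if c < 0 then m else c
  get_dest_loop L m (c.toNat + 2) c

-- ===== PORT B =====
def get_dest_alt (L : List Int) (cur : Int) : Int :=
  let below := L.filter (fun v => decide (0 ≤ v) && decide (v < cur))
  let dest :=
    match PySem.List.max? below (fun x => x) with
    | some b => b
    | none => (PySem.List.max? L (fun x => x)).getD 0
  ((PySem.List.index? L dest).getD 0 : Int)

-- ===== PRECONDITION & SPEC =====
-- Pre_ excludes only L = [], on which Python's max(L) raises ValueError in both A and B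
def Pre_get_dest (L : List Int) (cur : Int) : Prop := L ≠ []
instance (L : List Int) (cur : Int) : Decidable (Pre_get_dest L cur) := by unfold Pre_get_dest; infer_instance

def pvWitness_get_dest : List Int × Int := ([3, 1], 2)

def Spec_get_dest (L : List Int) (cur : Int) (out : Int) : Prop := out = get_dest_alt L cur
instance (L : List Int) (cur : Int) (out : Int) : Decidable (Spec_get_dest L cur out) := by unfold Spec_get_dest; infer_instance

-- ===== CLAIM (what is proved, stated in full; the proofs are below) =====
def Claim_equal_get_dest : Prop := ∀ (L : List Int) (cur : Int), Dom_get_dest L cur → Pre_get_dest L cur → Spec_get_dest L cur (get_dest L cur)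

-- ===== LEMMAS AND PROOFS =====

-- B's value, parametrised by the (inclusive) upper bound c = cur - 1
def altFrom (L : List Int) (m : Int) (c : Int) : Int :=
  match PySem.List.max? (L.filter (fun v => decide (0 ≤ v) && decide (v ≤ c))) (fun x => x) with
  | some b => ((PySem.List.index? L b).getD 0 : Int)
  | none => ((PySem.List.index? L m).getD 0 : Int)

lemma filter_le_shift {L : List Int} {c : Int} (hc : c ∉ L) :
    L.filter (fun v => decide (0 ≤ v) && decide (v ≤ c))
      = L.filter (fun v => decide (0 ≤ v) && decide (v ≤ c - 1)) := by
  apply List.filter_congr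
  intro v hv
  have hvc : v ≠ c := fun h => hc (h ▸ hv)
  by_cases h0 : (0 : Int) ≤ v
  · by_cases h1 : v ≤ c - 1 <;> simp [h0, h1] <;> omega
  · simp [h0]

lemma loop_spec (L : List Int) (m : Int) (hm : m ∈ L) (hmax : ∀ y ∈ L, y ≤ m) :
    ∀ (fuel : Nat) (c : Int), 0 ≤ c → c.toNat + 2 ≤ fuel →
      get_dest_loop L m fuel c = altFrom L m c := by
  intro fuel
  induction fuel with
  | zero => intro c _ h; omega
  | succ n ih =>
    intro c hc hfuel
    rcases hidx : PySem.List.index? L c with _ | i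
    · -- c ∉ L
      have hcL : c ∉ L := (PySem.List.index?_eq_none_iff L c).1 hidx
      by_cases hc0 : c = 0
      · -- wrap to m; m ∈ L so the next step returns its index
        subst hc0
        have hn : 1 ≤ n := by omega
        obtain ⟨k, rfl⟩ : ∃ k, n = k + 1 := ⟨n - 1, by omega⟩
        have hmidx : (PySem.List.index? L m).isSome :=
          (PySem.List.index?_isSome_iff L m).2 hm
        rcases hmi : PySem.List.index? L m with _ | j
        · exact absurd hm ((PySem.List.index?_eq_none_iff L m).1 hmi)
        · have hfe : L.filter (fun v => decide (0 ≤ v) && decide (v ≤ (0:Int))) = [] := by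
            rw [List.filter_eq_nil_iff]
            intro v hv
            have : v ≠ 0 := fun h => hcL (h ▸ hv)
            simp only [Bool.and_eq_true, decide_eq_true_eq, not_and]
            omega
          simp only [PySem.List.index?_eq_idxOf?] at hidx hmi
          have hmn : PySem.List.max? ([] : List Int) (fun x => x) = none :=
            (PySem.List.max?_eq_none_iff _ _).2 rfl
          simp [get_dest_loop, hidx, hmi, altFrom, hfe, hmn]
      · -- descend to c - 1
        have hstep : get_dest_loop L m (n+1) c = get_dest_loop L m n (c - 1) := by
          have h2 : ¬ (c - 1 < 0) := by omega
          simp only [PySem.List.index?_eq_idxOf?] at hidx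
          simp [get_dest_loop, hidx, h2]
        rw [hstep, ih (c - 1) (by omega) (by omega)]
        unfold altFrom
        rw [filter_le_shift hcL]
    · -- c ∈ L : the filtered maximum is c itself
      have hcL : c ∈ L := (PySem.List.index?_isSome_iff L c).1 (by rw [hidx]; rfl)
      have hcf : c ∈ L.filter (fun v => decide (0 ≤ v) && decide (v ≤ c)) := by
        simp [List.mem_filter, hcL, hc]
      rcases hb : PySem.List.max? (L.filter (fun v => decide (0 ≤ v) && decide (v ≤ c))) (fun x => x) with _ | b
      · exact absurd (List.ne_nil_of_mem hcf) (by simpa using (PySem.List.max?_eq_none_iff _ _).1 hb)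
      · have hbmem := PySem.List.max?_mem hb
        have hble : b ≤ c := by
          have := (List.mem_filter.1 hbmem).2
          simp only [Bool.and_eq_true, decide_eq_true_eq] at this
          exact this.2
        have hcle : c ≤ b := PySem.List.max?_isMax hb c hcf
        have hbc : b = c := le_antisymm hble hcle
        simp only [PySem.List.index?_eq_idxOf?] at hidx
        simp [get_dest_loop, hidx, altFrom, hb, hbc]

-- ===== VERDICT (by name: the statement is the Claim_ definition above) =====
theorem get_dest_spec : Claim_equal_get_dest := by
  intro L cur _ hpre
  unfold Spec_get_dest get_dest get_dest_alt
  rcases hL : PySem.List.max? L (fun x => x) with _ | m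
  · exact absurd ((PySem.List.max?_eq_none_iff _ _).1 hL) hpre
  · have hm : m ∈ L := PySem.List.max?_mem hL
    have hmax : ∀ y ∈ L, y ≤ m := PySem.List.max?_isMax hL
    simp only [hL, Option.getD_some]
    by_cases hneg : cur - 1 < 0
    · -- wrap immediately: A looks up m; B's filter is empty so dest = m
      have hmidx : (PySem.List.index? L m).isSome :=
        (PySem.List.index?_isSome_iff L m).2 hm
      rcases hmi : PySem.List.index? L m with _ | j
      · exact absurd hm ((PySem.List.index?_eq_none_iff L m).1 hmi)
      · have hfe : L.filter (fun v => decide (0 ≤ v) && decide (v < cur)) = [] := by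
          rw [List.filter_eq_nil_iff]
          intro v _
          simp only [Bool.and_eq_true, decide_eq_true_eq, not_and]
          omega
        simp only [PySem.List.index?_eq_idxOf?] at hmi
        have hmn : PySem.List.max? ([] : List Int) (fun x => x) = none :=
          (PySem.List.max?_eq_none_iff _ _).2 rfl
        simp [hneg, get_dest_loop, hmi, hfe, hmn]
    · -- descend from cur - 1
      have h := loop_spec L m hm hmax ((cur - 1).toNat + 2) (cur - 1) (by omega) (le_refl _)
      have hfilter : L.filter (fun v => decide (0 ≤ v) && decide (v ≤ cur - 1))
          = L.filter (fun v => decide (0 ≤ v) && decide (v < cur)) := by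
        apply List.filter_congr
        intro v _
        by_cases h0 : (0 : Int) ≤ v
        · by_cases h1 : v < cur <;> simp [h0, h1] <;> omega
        · simp [h0]
      simp only [hneg, if_false]
      rw [h]
      unfold altFrom
      rw [hfilter]
      rcases hb : PySem.List.max? (L.filter (fun v => decide (0 ≤ v) && decide (v < cur))) (fun x => x) with _ | b
      · rcases hmi : PySem.List.index? L m with _ | j
        · exact absurd hm ((PySem.List.index?_eq_none_iff L m).1 hmi)
        · simp [hmi]
      · simp
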